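-- pv_equiv track=rewrite | github.com/ADavidBailey/Practice-Bidding-Scenarios | docs/generateDashboardData.py | aggregate_commits_by_month
-- ===== SOURCE A (Python) =====
-- from collections import defaultdict
--
-- def aggregate_commits_by_month(commits):
--     """Aggregate commits by month"""
--     monthly = defaultdict(int)
--     for commit in commits:
--         date_str = commit.get('date', '')
--         if date_str:
--             # Format: "2026-01-26 14:30:00 -0500"
--             month = date_str[:7]
--             monthly[month] += 1
--     return dict(sorted(monthly.items()))
-- ===== SOURCE B (Python) =====
-- from itertools import groupby
--
-- def aggregate_commits_by_month(commits):
--     """Aggregate commits by month (sort-then-group instead of hash-accumulate-then-sort)"""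
--     months = sorted(commit.get('date', '')[:7] for commit in commits if commit.get('date', ''))
--     return {month: len(list(group)) for month, group in groupby(months)}
-- ===== Notes on version B (the rewrite author's own statement) =====
-- stated objective: alternative
-- what changed: Replaces A's defaultdict hash-accumulation followed by sorting the items with collecting all month prefixes into a list, sorting it, and counting consecutive runs groupby-style to emit the result directly in sorted order.
import Mathlib
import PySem

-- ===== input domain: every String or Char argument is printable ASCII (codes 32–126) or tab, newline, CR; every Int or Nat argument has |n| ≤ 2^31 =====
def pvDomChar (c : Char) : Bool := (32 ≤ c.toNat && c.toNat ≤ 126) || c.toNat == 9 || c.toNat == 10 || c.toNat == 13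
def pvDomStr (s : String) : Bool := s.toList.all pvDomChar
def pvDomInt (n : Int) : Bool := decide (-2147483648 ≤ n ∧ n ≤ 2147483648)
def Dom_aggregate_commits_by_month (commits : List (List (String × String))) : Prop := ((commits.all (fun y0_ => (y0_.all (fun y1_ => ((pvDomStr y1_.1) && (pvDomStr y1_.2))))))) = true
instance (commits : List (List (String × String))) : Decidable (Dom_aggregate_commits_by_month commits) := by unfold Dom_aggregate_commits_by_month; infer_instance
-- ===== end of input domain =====

-- B replaces A's hash-map accumulation followed by a sort of the items with
-- sort-the-month-list-then-group-consecutive-runs (itertools.groupby); objective: alternative.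

-- ===== PORT A =====
-- dict keys are distinct, so Python's tuple sort of monthly.items() is exactly a sort by the key
def aggregate_commits_by_month (commits : List (List (String × String))) : List (String × Int) :=
  let monthly := commits.foldl (fun monthly commit =>
    let date_str := (PySem.Dict.mk commit).getD "date" ""
    if date_str ≠ "" then
      let month := PySem.Str.slice date_str none (some 7)
      monthly.modify month 0 (fun x => x + 1)   -- defaultdict(int): monthly[month] += 1
    else monthly) PySem.Dict.empty
  PySem.List.sorted monthly.items (fun p => p.1)

-- ===== PORT B =====
-- len(list(group)) for the run starting at m: 1 (for m) + length of the run of m's that follows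
def pvGroupCounts : List String → List (String × Int)
  | [] => []
  | m :: rest =>
      (m, ((rest.takeWhile (· == m)).length + 1 : Int)) ::
        pvGroupCounts (rest.dropWhile (· == m))
termination_by l => l.length
decreasing_by
  simp only [List.length_cons]
  exact Nat.lt_succ_of_le (List.length_dropWhile_le _ _)

def aggregate_commits_by_month_alt (commits : List (List (String × String))) : List (String × Int) :=
  let months := PySem.List.sorted
    (commits.filterMap (fun commit =>
      let ds := (PySem.Dict.mk commit).getD "date" ""
      if ds ≠ "" then some (PySem.Str.slice ds none (some 7)) else none))
    (fun m => m)
  pvGroupCounts months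

-- ===== PRECONDITION & SPEC =====
def Spec_aggregate_commits_by_month (commits : List (List (String × String))) (out : List (String × Int)) : Prop := out = aggregate_commits_by_month_alt commits
instance (commits : List (List (String × String))) (out : List (String × Int)) : Decidable (Spec_aggregate_commits_by_month commits out) := by unfold Spec_aggregate_commits_by_month; infer_instance

-- ===== CLAIM (what is proved, stated in full; the proofs are below) =====
def Claim_equal_aggregate_commits_by_month : Prop := ∀ (commits : List (List (String × String))), Dom_aggregate_commits_by_month commits → Spec_aggregate_commits_by_month commits (aggregate_commits_by_month commits)

-- ===== LEMMAS AND PROOFS =====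

-- the month extracted from one commit, if any (shared shape of both ports)
def pvMonth? (commit : List (String × String)) : Option String :=
  let ds := (PySem.Dict.mk commit).getD "date" ""
  if ds ≠ "" then some (PySem.Str.slice ds none (some 7)) else none

theorem body_eq_match :
    (fun (monthly : PySem.Dict String Int) (commit : List (String × String)) =>
      let date_str := (PySem.Dict.mk commit).getD "date" ""
      if date_str ≠ "" then
        monthly.modify (PySem.Str.slice date_str none (some 7)) 0 (fun x => x + 1)
      else monthly)
    = (fun monthly commit => match pvMonth? commit with
        | some m => monthly.modify m 0 (fun x => x + 1)
        | none => monthly) := by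
  funext d c
  simp only [pvMonth?]
  split <;> rfl

theorem foldl_match_eq_foldl_filterMap (commits : List (List (String × String)))
    (d : PySem.Dict String Int) :
    commits.foldl (fun monthly commit => match pvMonth? commit with
        | some m => monthly.modify m 0 (fun x => x + 1)
        | none => monthly) d
    = (commits.filterMap pvMonth?).foldl (fun d x => d.modify x 0 (fun x => x + 1)) d := by
  induction commits generalizing d with
  | nil => rfl
  | cons c cs ih =>
      rw [List.foldl_cons, List.filterMap_cons]
      cases hm : pvMonth? c <;> simp only [ih, List.foldl_cons]

-- in a ≤-sorted list with head m, everything after the leading run of m's is > m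
theorem lt_of_mem_dropWhile (m : String) (rest : List String)
    (hp : List.Pairwise (· ≤ ·) (m :: rest)) :
    ∀ x ∈ rest.dropWhile (· == m), m < x := by
  induction rest with
  | nil => simp
  | cons r rs ih =>
      intro x hx
      rw [List.pairwise_cons] at hp
      obtain ⟨hm, hrs⟩ := hp
      by_cases hr : r = m
      · subst hr
        rw [List.dropWhile_cons_of_pos (by simp)] at hx
        refine ih ?_ x hx
        rw [List.pairwise_cons] at hrs ⊢
        exact ⟨fun a ha => le_trans (hm r (by simp)) (hrs.1 a ha), hrs.2⟩
      · rw [List.dropWhile_cons_of_neg (by simp [hr])] at hx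
        have hmr : m < r := lt_of_le_of_ne (hm r (by simp)) (Ne.symm hr)
        rcases List.mem_cons.mp hx with h | h
        · exact h ▸ hmr
        · exact lt_of_lt_of_le hmr ((List.pairwise_cons.mp hrs).1 x h)

theorem pvGroupCounts_spec (s : List String) (hp : List.Pairwise (· ≤ ·) s) :
    List.Pairwise (fun a b => a.1 < b.1) (pvGroupCounts s) ∧
    (∀ m c, (m, c) ∈ pvGroupCounts s ↔ m ∈ s ∧ c = (s.count m : Int)) := by
  induction s using pvGroupCounts.induct with
  | case1 => simp [pvGroupCounts]
  | case2 m rest ih =>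
      have hdrop_lt := lt_of_mem_dropWhile m rest hp
      have hdrop_pw : List.Pairwise (· ≤ ·) (rest.dropWhile (· == m)) :=
        List.Pairwise.sublist (List.dropWhile_sublist _) (List.pairwise_cons.mp hp).2
      obtain ⟨ihpw, ihmem⟩ := ih hdrop_pw
      have hsplit : rest.takeWhile (· == m) ++ rest.dropWhile (· == m) = rest :=
        List.takeWhile_append_dropWhile
      have htake : ∀ x ∈ rest.takeWhile (· == m), x = m := by
        intro x hx
        simpa using List.mem_takeWhile_imp hx
      have hcsplit : ∀ x : String,
          rest.count x = (rest.takeWhile (· == m)).count x + (rest.dropWhile (· == m)).count x := by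
        intro x
        conv_lhs => rw [← hsplit]
        rw [List.count_append]
      have hcount_m : (m :: rest).count m = (rest.takeWhile (· == m)).length + 1 := by
        rw [List.count_cons_self, hcsplit m]
        have h1 : (rest.takeWhile (· == m)).count m = (rest.takeWhile (· == m)).length :=
          List.count_eq_length.mpr (fun a ha => ((htake a ha) ▸ rfl : m = a))
        have h2 : (rest.dropWhile (· == m)).count m = 0 :=
          List.count_eq_zero.mpr (fun h => lt_irrefl m (hdrop_lt m h))
        omega
      have hcount_ne : ∀ x, x ≠ m → (m :: rest).count x = (rest.dropWhile (· == m)).count x := by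
        intro x hx
        have h0 : (rest.takeWhile (· == m)).count x = 0 :=
          List.count_eq_zero.mpr (fun h => hx (htake x h))
        simp only [List.count_cons, beq_iff_eq, hcsplit x, h0, Ne.symm hx, if_false]
        omega
      have hmem_ne : ∀ x, x ≠ m → (x ∈ (m :: rest) ↔ x ∈ rest.dropWhile (· == m)) := by
        intro x hx
        constructor
        · intro h
          rcases List.mem_cons.mp h with h | h
          · exact absurd h hx
          · conv at h => rw [← hsplit]
            rcases List.mem_append.mp h with h | h
            · exact absurd (htake x h) hx
            · exact h
        · intro h
          exact List.mem_cons_of_mem _ ((List.dropWhile_sublist _).subset h)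
      constructor
      · rw [pvGroupCounts, List.pairwise_cons]
        refine ⟨?_, ihpw⟩
        intro ⟨k, c⟩ hk
        exact hdrop_lt k ((ihmem k c).mp hk).1
      · intro x c
        rw [pvGroupCounts]
        simp only [List.mem_cons, Prod.mk.injEq, ihmem]
        constructor
        · rintro (⟨hx, hc⟩ | ⟨hmem, hc⟩)
          · subst hx
            refine ⟨Or.inl rfl, ?_⟩
            rw [hcount_m]
            push_cast
            omega
          · have hxm : x ≠ m := fun h => lt_irrefl m (h ▸ hdrop_lt x hmem)
            exact ⟨List.mem_cons.mp ((hmem_ne x hxm).mpr hmem), by rw [hcount_ne x hxm]; exact hc⟩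
        · rintro ⟨hmem, hc⟩
          by_cases hxm : x = m
          · subst hxm
            refine Or.inl ⟨rfl, ?_⟩
            rw [hcount_m] at hc
            push_cast at hc
            omega
          · exact Or.inr ⟨(hmem_ne x hxm).mp (List.mem_cons.mpr hmem), by rw [hcount_ne x hxm] at hc; exact hc⟩

-- ===== VERDICT (by name: the statement is the Claim_ definition above) =====
theorem aggregate_commits_by_month_spec : Claim_equal_aggregate_commits_by_month := by
  intro commits _
  unfold Spec_aggregate_commits_by_month aggregate_commits_by_month aggregate_commits_by_month_alt
  simp only []
  rw [body_eq_match, foldl_match_eq_foldl_filterMap, ← PySem.Dict.counter_eq_foldl,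
    PySem.Dict.items_counter]
  set ms := commits.filterMap pvMonth? with hms
  have hfm : commits.filterMap (fun commit =>
      let ds := (PySem.Dict.mk commit).getD "date" ""
      if ds ≠ "" then some (PySem.Str.slice ds none (some 7)) else none) = ms := rfl
  rw [hfm]
  set s := PySem.List.sorted ms (fun m => m) with hs
  have hperm : s.Perm ms := PySem.List.sorted_perm ms (fun m => m) false
  have hpw : List.Pairwise (· ≤ ·) s := PySem.List.sorted_pairwise ms (fun m => m)
  obtain ⟨gpw, gmem⟩ := pvGroupCounts_spec s hpw
  refine PySem.List.sorted_eq_of_perm_of_pairwise_lt _ (pvGroupCounts s)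
    (fun p => p.1) ?_ gpw
  have hnd1 : (pvGroupCounts s).Nodup :=
    List.Pairwise.imp (fun h => fun he => absurd (congrArg Prod.fst he) (ne_of_lt h)) gpw
  have hnd2 : ((PySem.Set.ofList ms).map (fun k => (k, (ms.count k : Int)))).Nodup :=
    (PySem.Set.nodup_ofList ms).map (fun a b h => (Prod.ext_iff.mp h).1)
  refine List.perm_of_nodup_nodup_toFinset_eq hnd1 hnd2 ?_
  ext ⟨m, c⟩
  simp only [List.mem_toFinset, List.mem_map, gmem, PySem.Set.mem_ofList, Prod.mk.injEq]
  constructor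
  · rintro ⟨hmem, hc⟩
    exact ⟨m, hperm.mem_iff.mp hmem, rfl, by rw [hc, hperm.count_eq]⟩
  · rintro ⟨k, hk, h1, h2⟩
    subst h1
    exact ⟨hperm.mem_iff.mpr hk, by rw [hperm.count_eq]; exact h2.symm⟩
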